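-- pv_equiv track=rewrite | github.com/chud575/Neural-Razz-Trainer | backend/razz_eval.py | penalize_pairs
-- ===== SOURCE A (Python) =====
-- from typing import List, Tuple
--
-- def penalize_pairs(ranks: List[int]) -> List[int]:
--     """Add 13 to each duplicate occurrence of a rank.
--
--     First occurrence stays at face value.
--     Second occurrence gets +13.
--     Third occurrence gets +26.
--     Fourth occurrence gets +39.
--
--     Examples:
--         [1, 1, 9, 8, 5, 4, 3] → [1, 14, 9, 8, 5, 4, 3]
--         [13, 13, 2, 3, 4, 5] → [13, 26, 2, 3, 4, 5]
--         [5, 5, 5, 2, 3, 4, 6] → [5, 18, 31, 2, 3, 4, 6]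
--     """
--     seen_count = {}
--     result = []
--     for r in ranks:
--         count = seen_count.get(r, 0)
--         result.append(r + count * 13)
--         seen_count[r] = count + 1
--     return result
-- ===== SOURCE B (Python) =====
-- from typing import List
--
-- def penalize_pairs(ranks: List[int]) -> List[int]:
--     # Build the answer back-to-front over suffixes: extend with the current
--     # element at face value, then add 13 to every later position holding an
--     # equal rank -- no counts are ever maintained.
--     out = []
--     for k in range(len(ranks) - 1, -1, -1):
--         r = ranks[k]
--         out = [r] + [v + 13 if x == r else v for x, v in zip(ranks[k+1:], out)]
--     return out
-- ===== Notes on version B (the rewrite author's own statement) =====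
-- stated objective: alternative
-- what changed: Replaces the running-count dict with a back-to-front suffix construction: at each step the current element is prepended at face value and 13 is added to every already-built position holding an equal rank, so no occurrence counts are ever maintained.
import Mathlib
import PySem

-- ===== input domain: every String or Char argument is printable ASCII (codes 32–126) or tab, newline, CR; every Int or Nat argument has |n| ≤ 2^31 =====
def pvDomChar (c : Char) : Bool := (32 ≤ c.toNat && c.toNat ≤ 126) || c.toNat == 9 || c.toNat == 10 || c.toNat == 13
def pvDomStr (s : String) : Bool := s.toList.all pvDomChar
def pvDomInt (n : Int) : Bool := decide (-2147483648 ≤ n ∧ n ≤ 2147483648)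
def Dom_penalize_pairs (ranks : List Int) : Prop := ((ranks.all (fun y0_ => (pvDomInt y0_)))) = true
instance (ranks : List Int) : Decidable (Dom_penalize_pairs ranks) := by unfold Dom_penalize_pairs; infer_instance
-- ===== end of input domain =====

-- B builds the answer back-to-front over suffixes, adding 13 to equal-rank positions
-- already built, instead of A's forward pass with a running-count dict (alternative, not faster).

-- ===== PORT A =====
-- loop state: (seen_count dict, result list); 'result.append' is '++ [·]'
def penalize_pairs (ranks : List Int) : List Int :=
  (ranks.foldl
    (fun (st : PySem.Dict Int Int × List Int) r =>
      let count := st.1.getD r 0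
      (st.1.insert r (count + 1), st.2 ++ [r + count * 13]))
    (PySem.Dict.empty, [])).2

-- ===== PORT B =====
-- for k in range(len(ranks)-1, -1, -1): out = [ranks[k]] + [v+13 if x==ranks[k] else v
--                                                           for x, v in zip(ranks[k+1:], out)]
-- ranks[k] via pyGet?.getD 0: exact here, since every k produced by the range is in bounds.
def penalize_pairs_alt (ranks : List Int) : List Int :=
  (PySem.List.pyRange ((ranks.length : Int) - 1) (-1) (-1)).foldl
    (fun out k =>
      let r := (PySem.List.pyGet? ranks k).getD 0
      r :: ((PySem.List.slice ranks (some (k + 1)) none).zip out).map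
            (fun p => if p.1 == r then p.2 + 13 else p.2))
    []

-- ===== PRECONDITION & SPEC =====
def Spec_penalize_pairs (ranks : List Int) (out : List Int) : Prop := out = penalize_pairs_alt ranks
instance (ranks : List Int) (out : List Int) : Decidable (Spec_penalize_pairs ranks out) := by unfold Spec_penalize_pairs; infer_instance

-- ===== CLAIM (what is proved, stated in full; the proofs are below) =====
def Claim_equal_penalize_pairs : Prop := ∀ (ranks : List Int), Dom_penalize_pairs ranks → Spec_penalize_pairs ranks (penalize_pairs ranks)

-- ===== LEMMAS AND PROOFS =====

-- The recursive view of B's loop body: one step on the suffix starting at k.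
def pvRec : List Int → List Int
  | [] => []
  | r :: rest => r :: ((rest.zip (pvRec rest)).map fun p => if p.1 == r then p.2 + 13 else p.2)

-- pvRec computes the prefix-count characterization.
theorem pvRec_eq (l : List Int) :
    pvRec l = l.mapIdx (fun i x => x + ((l.take i).count x : Int) * 13) := by
  induction l with
  | nil => rfl
  | cons r rest ih =>
    simp only [pvRec, List.mapIdx_cons, List.take_zero, List.count_nil]
    refine List.cons_eq_cons.mpr ⟨by push_cast; ring, ?_⟩
    rw [ih]
    apply List.ext_getElem
    · simp
    · intro i h1 h2
      have hi : i < rest.length := by simpa using h2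
      simp only [List.getElem_map, List.getElem_zip, List.getElem_mapIdx,
        List.take_succ_cons, List.count_cons]
      by_cases h : rest[i] = r
      · simp [h]; ring
      · simp [h]
        exact fun hh => h hh.symm

-- One step of B's fold turns pvRec of the suffix at k+1 into pvRec of the suffix at k.
theorem pvStep (ranks : List Int) (k : Nat) (hk : k < ranks.length) :
    (let r := (PySem.List.pyGet? ranks (k : Int)).getD 0
     r :: ((PySem.List.slice ranks (some ((k : Int) + 1)) none).zip
            (pvRec (ranks.drop (k + 1)))).map
          (fun p => if p.1 == r then p.2 + 13 else p.2))
      = pvRec (ranks.drop k) := by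
  have hg : (PySem.List.pyGet? ranks (k : Int)).getD 0 = ranks[k] := by
    simp [PySem.List.pyGet?_natCast, List.getElem?_eq_getElem hk]
  have hs : PySem.List.slice ranks (some ((k : Int) + 1)) none = ranks.drop (k + 1) := by
    rw [PySem.List.slice_from ranks (by omega : (0 : Int) ≤ (k : Int) + 1)]
    norm_num
  simp only [hg, hs, List.drop_eq_getElem_cons hk]
  simp [pvRec]

-- The fold over the countdown range, from suffix k down to the whole list.
theorem pvFold (ranks : List Int) : ∀ (k : Nat), k ≤ ranks.length →
    (PySem.List.pyRange ((k : Int) - 1) (-1) (-1)).foldl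
      (fun out j =>
        let r := (PySem.List.pyGet? ranks j).getD 0
        r :: ((PySem.List.slice ranks (some (j + 1)) none).zip out).map
              (fun p => if p.1 == r then p.2 + 13 else p.2))
      (pvRec (ranks.drop k))
      = pvRec ranks := by
  intro k
  induction k with
  | zero =>
    intro _
    rw [PySem.List.pyRange_neg_one_eq_nil (by norm_num)]
    simp
  | succ k ih =>
    intro hk
    rw [show (((k + 1 : Nat) : Int) - 1) = (k : Int) by push_cast; ring,
      PySem.List.pyRange_neg_one_cons (by omega), List.foldl_cons,
      pvStep ranks k (by omega)]
    exact ih (by omega)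

-- B equals pvRec, hence the prefix-count characterization.
theorem pvB_eq (ranks : List Int) :
    penalize_pairs_alt ranks
      = ranks.mapIdx (fun i x => x + ((ranks.take i).count x : Int) * 13) := by
  rw [← pvRec_eq]
  unfold penalize_pairs_alt
  have h := pvFold ranks ranks.length le_rfl
  rw [List.drop_length] at h
  simpa [pvRec] using h

-- A's loop, generalized over an already-processed prefix: the dict holds the prefix counts.
theorem pvA_loop (l : List Int) : ∀ (pre : List Int) (d : PySem.Dict Int Int) (acc : List Int),
    (∀ r, d.getD r 0 = (pre.count r : Int)) →
    (l.foldl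
      (fun (st : PySem.Dict Int Int × List Int) r =>
        let count := st.1.getD r 0
        (st.1.insert r (count + 1), st.2 ++ [r + count * 13]))
      (d, acc)).2
      = acc ++ l.mapIdx (fun i r => r + ((pre ++ l.take i).count r : Int) * 13) := by
  induction l with
  | nil => intro pre d acc _; simp
  | cons x xs ih =>
    intro pre d acc hd
    simp only [List.foldl_cons]
    rw [ih (pre ++ [x]) _ _ (fun r => by
      have h1 := PySem.Dict.getD_foldl_insert_add_one (l := [x]) (d := d) (v := r)
      simp only [List.foldl_cons, List.foldl_nil] at h1
      rw [h1, hd]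
      simp [List.count_append]
      )]
    simp only [List.mapIdx_cons, List.take_succ_cons, List.take_zero, List.append_nil]
    rw [hd x]
    simp [List.append_assoc]

theorem penalize_pairs_eq (ranks : List Int) :
    penalize_pairs ranks = penalize_pairs_alt ranks := by
  unfold penalize_pairs
  rw [pvA_loop ranks [] PySem.Dict.empty [] (fun r => by simp [PySem.Dict.getD])]
  rw [pvB_eq]
  simp

-- ===== VERDICT (by name: the statement is the Claim_ definition above) =====
theorem penalize_pairs_spec : Claim_equal_penalize_pairs := by
  intro ranks _
  exact penalize_pairs_eq ranks
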